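-- pv_equiv track=rewrite | github.com/mcjmk/hostsPageBlocker | hostsPageBlocker.py | all_possible_urls
-- ===== SOURCE A (Python) =====
-- def all_possible_urls(urls):
--     """
--     :param urls:
--     :return:
--     """
--     www_urls = [('www.' + url) for url in urls]
--     http_urls = [('http://' + url) for url in urls]
--     https_urls = [('https://' + url) for url in urls]
--     http_www_urls = [('http://' + url) for url in www_urls]
--     https_www_urls = [('https://' + url) for url in www_urls]
--     all_urls = urls + www_urls + http_urls + https_urls + http_www_urls + https_www_urls
--     return all_urls
-- ===== SOURCE B (Python) =====
-- def all_possible_urls(urls):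
--     prefixes = ['', 'www.', 'http://', 'https://', 'http://www.', 'https://www.']
--     return [p + url for p in prefixes for url in urls]
-- ===== Notes on version B (the rewrite author's own statement) =====
-- stated objective: simpler
-- what changed: Replaces the five chained intermediate comprehensions and list concatenation with a single flat product over one fixed table of the six prefixes (empty, www, http, https and their combinations).
import Mathlib
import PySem

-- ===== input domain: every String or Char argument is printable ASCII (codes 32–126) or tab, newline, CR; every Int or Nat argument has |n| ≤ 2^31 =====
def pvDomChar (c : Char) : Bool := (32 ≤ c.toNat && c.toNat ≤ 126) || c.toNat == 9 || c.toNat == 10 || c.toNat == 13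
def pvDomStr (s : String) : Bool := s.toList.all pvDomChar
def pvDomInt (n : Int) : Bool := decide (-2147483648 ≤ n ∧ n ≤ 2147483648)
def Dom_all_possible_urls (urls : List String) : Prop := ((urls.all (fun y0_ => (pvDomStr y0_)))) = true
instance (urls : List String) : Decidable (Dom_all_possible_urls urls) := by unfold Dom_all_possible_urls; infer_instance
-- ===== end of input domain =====

-- B replaces A's five chained intermediate comprehensions with a flat product over one fixed prefix table (simpler).


-- ===== PORT A =====
def all_possible_urls (urls : List String) : List String :=
  let www_urls := urls.map (fun url => "www." ++ url)
  let http_urls := urls.map (fun url => "http://" ++ url)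
  let https_urls := urls.map (fun url => "https://" ++ url)
  let http_www_urls := www_urls.map (fun url => "http://" ++ url)
  let https_www_urls := www_urls.map (fun url => "https://" ++ url)
  urls ++ www_urls ++ http_urls ++ https_urls ++ http_www_urls ++ https_www_urls

-- ===== PORT B =====
def all_possible_urls_alt (urls : List String) : List String :=
  let prefixes := ["", "www.", "http://", "https://", "http://www.", "https://www."]
  prefixes.flatMap (fun p => urls.map (fun url => p ++ url))

-- ===== PRECONDITION & SPEC =====
def Spec_all_possible_urls (urls : List String) (out : List String) : Prop := out = all_possible_urls_alt urls
instance (urls : List String) (out : List String) : Decidable (Spec_all_possible_urls urls out) := by unfold Spec_all_possible_urls; infer_instance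

-- ===== CLAIM (what is proved, stated in full; the proofs are below) =====
def Claim_equal_all_possible_urls : Prop := ∀ (urls : List String), Dom_all_possible_urls urls → Spec_all_possible_urls urls (all_possible_urls urls)

-- ===== LEMMAS AND PROOFS =====

theorem pv_prefix_append (p q : String) (urls : List String) :
    urls.map (fun url => p ++ (q ++ url)) = urls.map (fun url => (p ++ q) ++ url) := by
  apply List.map_congr_left; intro u _; rw [String.append_assoc]

-- ===== VERDICT (by name: the statement is the Claim_ definition above) =====
theorem all_possible_urls_spec : Claim_equal_all_possible_urls := by
  intro urls _
  unfold Spec_all_possible_urls all_possible_urls all_possible_urls_alt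
  simp only [List.flatMap_cons, List.flatMap_nil, List.map_map, List.append_nil, List.append_assoc,
    Function.comp_def]
  rw [pv_prefix_append "http://" "www.", pv_prefix_append "https://" "www."]
  congr 1
  · exact (List.map_id urls).symm.trans (List.map_congr_left (fun u _ => by simp))
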